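-- pv_equiv track=rewrite | github.com/pypi-data/pypi-mirror-77 | packages/randstr-random/randstr-random-1.1.1.tar.gz/randstr-random-1.1.1/randstr.py | isads
-- ===== SOURCE A (Python) =====
-- def isads(arg):
--     if (type(arg) is not str):
--         raise TypeError("The arg argument isn't a string!")
--
--     ads_digits = str("@%+'!#$^?:,(){}[]~-_.0123456789abcdefghijklmnopqrstuvwyxz")
--
--     for digit in arg.lower():
--         if not (digit in ads_digits):
--             return False
--
--     return True
-- ===== SOURCE B (Python) =====
-- # Bitset of allowed code points: OR of 1 << ord(c) over the allowed characters
-- # "@%+'!#$^?:,(){}[]~-_.0123456789abcdefghijklmnopqrstuvwyxz" and their uppercase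
-- # forms (case handled by the mask instead of lowercasing the input).
-- _ADS_MASK = 0x6ffffffeefffffff87ff7bba00000000
--
-- def isads(arg):
--     if (type(arg) is not str):
--         raise TypeError("The arg argument isn't a string!")
--     m = 0
--     for ch in arg:
--         m |= 1 << ord(ch)
--     return (m | _ADS_MASK) == _ADS_MASK
-- ===== Notes on version B (the rewrite author's own statement) =====
-- stated objective: alternative
-- what changed: Instead of lowercasing the input and scanning the allowed-character string per character with an early return, B folds the raw input into a single integer bitset (one bit per code point) and decides the answer with one bitwise OR-test against a precomputed mask that already contains both letter cases.
import Mathlib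
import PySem

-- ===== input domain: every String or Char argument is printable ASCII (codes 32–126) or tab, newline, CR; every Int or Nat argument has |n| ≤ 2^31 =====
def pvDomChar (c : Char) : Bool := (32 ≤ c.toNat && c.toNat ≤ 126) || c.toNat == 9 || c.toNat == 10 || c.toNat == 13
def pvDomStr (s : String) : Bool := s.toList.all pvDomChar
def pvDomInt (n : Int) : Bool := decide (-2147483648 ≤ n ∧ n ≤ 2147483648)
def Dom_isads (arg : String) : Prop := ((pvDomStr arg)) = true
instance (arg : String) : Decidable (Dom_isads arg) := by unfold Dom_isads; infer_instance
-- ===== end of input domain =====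

-- B replaces A's per-character membership loop over a lowercased copy by folding the
-- input into a single integer bitset (one bit per code point) and one bitwise test
-- against a precomputed mask that already contains both letter cases.
-- A's `type(arg) is not str` guard is moot in Lean (arg : String); both are total.

-- ===== PORT A =====
-- the loop `for digit in arg.lower(): if not (digit in ads_digits): return False`
def isadsLoop (digits : List Char) : List Char → Bool
  | [] => true
  | d :: rest => if !(digits.contains d) then false else isadsLoop digits rest

def isads (arg : String) : Bool :=
  let ads_digits := "@%+'!#$^?:,(){}[]~-_.0123456789abcdefghijklmnopqrstuvwyxz".toList
  isadsLoop ads_digits (PySem.Str.lower arg).toList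

-- ===== PORT B =====
-- bitset of allowed code points (allowed characters and their uppercase forms)
def adsMask : Nat := 0x6ffffffeefffffff87ff7bba00000000

def isads_alt (arg : String) : Bool :=
  let m := arg.toList.foldl (fun m c => m ||| (1 <<< c.toNat)) 0
  decide ((m ||| adsMask) = adsMask)

-- ===== PRECONDITION & SPEC =====
def Spec_isads (arg : String) (out : Bool) : Prop := out = isads_alt arg
instance (arg : String) (out : Bool) : Decidable (Spec_isads arg out) := by unfold Spec_isads; infer_instance

-- ===== CLAIM (what is proved, stated in full; the proofs are below) =====
def Claim_equal_isads : Prop := ∀ (arg : String), Dom_isads arg → Spec_isads arg (isads arg)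

-- ===== LEMMAS AND PROOFS =====
theorem isadsLoop_iff (ds : List Char) (l : List Char) :
    isadsLoop ds l = true ↔ ∀ x ∈ l, x ∈ ds := by
  induction l with
  | nil => simp [isadsLoop]
  | cons d rest ih =>
    simp only [isadsLoop]
    by_cases h : d ∈ ds <;> simp [h, ih]

theorem lor_eq_right_iff (a M : Nat) :
    (a ||| M = M) ↔ ∀ i, a.testBit i = true → M.testBit i = true := by
  constructor
  · intro h i hi
    have := congrArg (fun x => Nat.testBit x i) h
    simpa [Nat.testBit_or, hi] using this
  · intro h
    apply Nat.eq_of_testBit_eq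
    intro i
    simp only [Nat.testBit_or]
    by_cases hi : a.testBit i = true
    · simp [hi, h i hi]
    · simp [Bool.eq_false_iff.mpr hi]

theorem lor_lor_eq_right_iff (m x M : Nat) :
    ((m ||| x) ||| M = M) ↔ (m ||| M = M ∧ x ||| M = M) := by
  simp only [lor_eq_right_iff, Nat.testBit_or, Bool.or_eq_true]
  constructor
  · intro h
    exact ⟨fun i hi => h i (Or.inl hi), fun i hi => h i (Or.inr hi)⟩
  · rintro ⟨h1, h2⟩ i (hi | hi)
    · exact h1 i hi
    · exact h2 i hi

theorem fold_or_iff (l : List Char) (m M : Nat) :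
    ((l.foldl (fun m c => m ||| (1 <<< c.toNat)) m) ||| M = M) ↔
      (m ||| M = M ∧ ∀ c ∈ l, (1 <<< c.toNat) ||| M = M) := by
  induction l generalizing m with
  | nil => simp
  | cons d rest ih =>
    simp only [List.foldl_cons, ih, lor_lor_eq_right_iff, List.mem_cons]
    constructor
    · rintro ⟨⟨h1, h2⟩, h3⟩
      exact ⟨h1, fun c hc => hc.elim (fun e => e ▸ h2) (h3 c)⟩
    · rintro ⟨h1, h2⟩
      exact ⟨⟨h1, h2 d (Or.inl rfl)⟩, fun c hc => h2 c (Or.inr hc)⟩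

-- one finite check over all domain code points: bit n is in the mask
-- exactly when the lowercased character with code n is in A's allowed list
set_option maxRecDepth 4000 in
theorem char_fact : ∀ n : Fin 127,
    (((1 <<< (n : Nat)) ||| adsMask = adsMask) ↔
      (PySem.Chars.lowerChar (Char.ofNat (n : Nat)) ∈
        "@%+'!#$^?:,(){}[]~-_.0123456789abcdefghijklmnopqrstuvwyxz".toList)) := by
  decide

theorem dom_char_lt (c : Char) (h : pvDomChar c = true) : c.toNat < 127 := by
  simp only [pvDomChar, Bool.or_eq_true, Bool.and_eq_true, decide_eq_true_eq, beq_iff_eq] at h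
  omega

-- ===== VERDICT (by name: the statement is the Claim_ definition above) =====
theorem isads_spec : Claim_equal_isads := by
  intro arg hdom
  unfold Spec_isads isads isads_alt
  simp only [Dom_isads, pvDomStr, List.all_eq_true] at hdom
  rw [Bool.eq_iff_iff, isadsLoop_iff, decide_eq_true_iff, fold_or_iff,
    PySem.Str.toList_lower, PySem.Chars.lower]
  simp only [List.mem_map, forall_exists_index, and_imp, forall_apply_eq_imp_iff₂,
    Nat.zero_or, true_and]
  refine forall_congr' fun c => ?_
  refine imp_congr_right fun hc => ?_
  have hlt : c.toNat < 127 := dom_char_lt c (hdom c hc)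
  have := char_fact ⟨c.toNat, hlt⟩
  simp only [Char.ofNat_toNat] at this
  exact this.symm
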